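-- pv_equiv track=rewrite | github.com/JamesKohlsRepo/CompSciProjects | Tesselation Project/Terrain.py | createTRIANGLESlist
-- ===== SOURCE A (Python) =====
-- def createTRIANGLESlist(VERTICES):
--     #generates the list of verticies automatically based on the point corrections
--     finalist = []
--     templist = []
--     for i in range(0, len(VERTICES)):
--         templist.append(i)
--         if len(templist) % 3 == 0:
--             finalist.append(templist)
--             templist = []
--
--     return finalist
-- ===== SOURCE B (Python) =====
-- def createTRIANGLESlist(VERTICES):
--     n = len(VERTICES) // 3
--     return [[3 * j, 3 * j + 1, 3 * j + 2] for j in range(n)]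
-- ===== Notes on version B (the rewrite author's own statement) =====
-- stated objective: simpler
-- what changed: Replaces the element-by-element pass with a mod-3 flush and temp-list accumulator by computing the triple count len//3 up front and emitting [3j,3j+1,3j+2] per group directly.
import Mathlib
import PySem

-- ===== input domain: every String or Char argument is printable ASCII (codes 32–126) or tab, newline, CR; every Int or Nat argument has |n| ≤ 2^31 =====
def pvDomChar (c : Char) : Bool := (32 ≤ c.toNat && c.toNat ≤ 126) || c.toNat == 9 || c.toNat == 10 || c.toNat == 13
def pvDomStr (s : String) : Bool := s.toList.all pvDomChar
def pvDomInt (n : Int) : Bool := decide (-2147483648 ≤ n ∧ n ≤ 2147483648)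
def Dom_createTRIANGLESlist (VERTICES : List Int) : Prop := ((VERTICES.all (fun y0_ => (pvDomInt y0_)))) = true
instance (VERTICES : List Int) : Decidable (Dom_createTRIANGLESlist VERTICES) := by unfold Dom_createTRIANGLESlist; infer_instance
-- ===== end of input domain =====

-- B computes the triple count len//3 up front and emits [3j,3j+1,3j+2] per group directly
-- (simpler: no temp-list accumulator with a mod-3 flush).

-- ===== PORT A =====
-- literal port of A: one pass over range(len(VERTICES)), appending i to templist and
-- flushing it into finalist whenever its length is a multiple of 3
def pvStepA (st : List (List Int) × List Int) (i : Int) : List (List Int) × List Int :=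
  let templist := st.2 ++ [i]
  if PySem.Int.mod (templist.length : Int) 3 == 0 then (st.1 ++ [templist], [])
  else (st.1, templist)

def createTRIANGLESlist (VERTICES : List Int) : List (List Int) :=
  ((PySem.List.pyRange 0 (VERTICES.length : Int) 1).foldl pvStepA ([], [])).1

-- ===== PORT B =====
def createTRIANGLESlist_alt (VERTICES : List Int) : List (List Int) :=
  let n := PySem.Int.floordiv (VERTICES.length : Int) 3
  (PySem.List.pyRange 0 n 1).map (fun j => [3 * j, 3 * j + 1, 3 * j + 2])

-- ===== PRECONDITION & SPEC =====
def Spec_createTRIANGLESlist (VERTICES : List Int) (out : List (List Int)) : Prop := out = createTRIANGLESlist_alt VERTICES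
instance (VERTICES : List Int) (out : List (List Int)) : Decidable (Spec_createTRIANGLESlist VERTICES out) := by unfold Spec_createTRIANGLESlist; infer_instance

-- ===== CLAIM (what is proved, stated in full; the proofs are below) =====
def Claim_equal_createTRIANGLESlist : Prop := ∀ (VERTICES : List Int), Dom_createTRIANGLESlist VERTICES → Spec_createTRIANGLESlist VERTICES (createTRIANGLESlist VERTICES)

-- ===== LEMMAS AND PROOFS =====

def pvTri (j : Nat) : List Int := [3 * (j : Int), 3 * (j : Int) + 1, 3 * (j : Int) + 2]

-- loop invariant for A: after processing indices 0..m-1, finalist holds the first m/3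
-- triples and templist holds the m%3 leftover indices 3*(m/3), …, m-1
theorem pvLoopA (m : Nat) :
    (PySem.List.pyRange 0 (m : Int) 1).foldl pvStepA ([], []) =
      ((List.range (m / 3)).map pvTri,
       (List.range (m % 3)).map (fun k => ((3 * (m / 3) + k : Nat) : Int))) := by
  induction m with
  | zero => simp
  | succ m ih =>
    have h : ((m : Int) + 1) = ((m + 1 : Nat) : Int) := by push_cast; ring
    rw [show ((m + 1 : Nat) : Int) = (m : Int) + 1 by push_cast; ring,
        PySem.List.pyRange_one_succ_right (by positivity), List.foldl_append, ih]
    simp only [List.foldl, pvStepA, List.length_append, List.length_map,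
      List.length_range, List.length_cons, List.length_nil]
    have hm3 : m % 3 = 0 ∨ m % 3 = 1 ∨ m % 3 = 2 := by omega
    have hbase : 3 * (m / 3) + m % 3 = m := by omega
    rcases hm3 with h3 | h3 | h3
    · have h1 : (m + 1) / 3 = m / 3 := by omega
      have h2 : (m + 1) % 3 = 1 := by omega
      rw [PySem.Int.mod_eq_emod_of_pos (by norm_num)]
      simp [h3, h1, h2, List.range_succ]
      omega
    · have h1 : (m + 1) / 3 = m / 3 := by omega
      have h2 : (m + 1) % 3 = 2 := by omega
      rw [PySem.Int.mod_eq_emod_of_pos (by norm_num)]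
      simp [h3, h1, h2, List.range_succ]
      omega
    · have h1 : (m + 1) / 3 = m / 3 + 1 := by omega
      have h2 : (m + 1) % 3 = 0 := by omega
      rw [PySem.Int.mod_eq_emod_of_pos (by norm_num)]
      simp [h3, h1, h2, List.range_succ, pvTri]
      omega

theorem pvAltChar (VERTICES : List Int) :
    createTRIANGLESlist_alt VERTICES = (List.range (VERTICES.length / 3)).map pvTri := by
  simp only [createTRIANGLESlist_alt]
  rw [show PySem.Int.floordiv ((VERTICES.length : Nat) : Int) 3
        = ((VERTICES.length / 3 : Nat) : Int) from
      PySem.Int.floordiv_natCast VERTICES.length 3]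
  rw [PySem.List.pyRange_one]
  have h : ((((VERTICES.length / 3 : Nat) : Int)) - 0).toNat = VERTICES.length / 3 := by omega
  rw [h]
  rw [List.map_map]
  exact List.map_congr_left (fun k _ => by simp [pvTri])

-- ===== VERDICT (by name: the statement is the Claim_ definition above) =====
theorem createTRIANGLESlist_spec : Claim_equal_createTRIANGLESlist := by
  intro VERTICES _
  unfold Spec_createTRIANGLESlist createTRIANGLESlist
  rw [pvLoopA VERTICES.length, pvAltChar]
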